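-- pv_equiv track=rewrite | github.com/tdziekan24/Flip-Flop-Table-Generator | create_tables.py | split_tables
-- ===== SOURCE A (Python) =====
-- from math import log2
--
-- def split_tables(ff_table: list, ff_type: str):
--     binary_length = int(log2(len(ff_table)))
--     all_splitted_tables = {}
--
--     for i in range(binary_length):
--         splitted_table = {}
--         for row in ff_table:
--             splitted_row = []
--
--             for element in ff_table[row]:
--                 try:
--                     splitted_row.append(element[i])
--                 except IndexError:
--                     splitted_row.append("-")
--
--             splitted_table[row] = splitted_row
--
--         ff_name = f'{ff_type}{binary_length - i - 1}'
--         all_splitted_tables[ff_name] = splitted_table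
--
--     return all_splitted_tables
-- ===== SOURCE B (Python) =====
-- from math import log2
--
--
-- def split_tables(ff_table: list, ff_type: str):
--     binary_length = int(log2(len(ff_table)))
--     # Normalise every element once to a fixed-width padded string, then let zip(*)
--     # transpose each row: no per-index extraction, bounds test or exception handling.
--     rows = {}
--     for row, elements in ff_table.items():
--         padded = (e[:binary_length].ljust(binary_length, '-') for e in elements)
--         cols = [list(c) for c in zip(*padded)]
--         rows[row] = cols if cols else [[] for _ in range(binary_length)]
--     return {f'{ff_type}{binary_length - i - 1}': {row: cols[i] for row, cols in rows.items()}
--             for i in range(binary_length)}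
-- ===== Notes on version B (the rewrite author's own statement) =====
-- stated objective: alternative
-- what changed: A makes binary_length full scans of the table, extracting element[i] under try/except per character; B normalises each element once to a fixed-width '-'-padded string and uses the built-in zip(*) transposition per row, so there is no per-index character extraction, bounds test or exception handling at all, and each subtable just picks a precomputed column.
import Mathlib
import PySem

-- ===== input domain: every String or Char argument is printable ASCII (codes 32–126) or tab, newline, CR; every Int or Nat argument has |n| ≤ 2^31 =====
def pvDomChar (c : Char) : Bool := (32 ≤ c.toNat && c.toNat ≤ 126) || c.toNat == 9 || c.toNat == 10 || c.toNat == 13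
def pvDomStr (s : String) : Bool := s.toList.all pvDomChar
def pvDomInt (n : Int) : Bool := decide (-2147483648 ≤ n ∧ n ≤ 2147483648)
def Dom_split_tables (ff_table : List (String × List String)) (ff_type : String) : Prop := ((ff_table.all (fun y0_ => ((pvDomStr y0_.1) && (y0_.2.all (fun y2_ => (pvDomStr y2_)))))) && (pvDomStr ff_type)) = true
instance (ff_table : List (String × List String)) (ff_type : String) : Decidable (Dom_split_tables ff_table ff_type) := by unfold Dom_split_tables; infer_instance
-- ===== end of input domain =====

-- B replaces A's binary_length table rescans with per-character try/except indexing by a fixed-width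
-- padding of each element plus a zip(*)-style transposition per row (objective: alternative, same cost).
-- The ff_table parameter is a Python dict: both ports normalise the association list through
-- PySem.Dict.ofList first, exactly as Python's dict construction does (last value wins, first position kept).

-- ===== PORT A =====
-- 'try: …append(element[i]) except IndexError: …append("-")': pyGet? is none exactly on IndexError
def pvTryCharAt (e : String) (i : Int) : String :=
  match PySem.Str.pyGet? e i with
  | some c => String.ofList [c]
  | none => "-"

-- every key inserted (row keys come from a dict; ff_name carries a distinct number per i) is fresh,
-- so each 'splitted_table[row] = …' / 'all_splitted_tables[ff_name] = …' appends, ported as '++ [ ]'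
def split_tables (ff_table : List (String × List String)) (ff_type : String) : List (String × List (String × List String)) :=
  let d := (PySem.Dict.ofList ff_table).items
  let binary_length := Nat.log2 d.length   -- int(log2(len(ff_table))), exact for these lengths; len = 0 excluded by Pre_
  (List.range binary_length).foldl (fun acc (i : Nat) =>
    let splitted_table := d.foldl (fun st row =>
      let splitted_row := row.2.foldl (fun sr element => sr ++ [pvTryCharAt element (i : Int)]) []
      st ++ [(row.1, splitted_row)]) []
    acc ++ [(ff_type ++ PySem.Int.toStr ((binary_length : Int) - (i : Int) - 1), splitted_table)]) []

-- ===== PORT B =====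
-- "e[:binary_length].ljust(binary_length, '-')": clamped take, then pad to width with '-'
def pvPad (bl : Nat) (e : String) : List Char :=
  let t := e.toList.take bl
  t ++ List.replicate (bl - t.length) '-'

-- Python's zip(*rows): take the heads while every row is nonempty (exact transliteration of zip)
def pvZip (rows : List (List Char)) : List (List Char) :=
  if h : rows ≠ [] ∧ rows.all (fun r => !r.isEmpty)
  then rows.map (fun r => r.headD ' ') :: pvZip (rows.map List.tail)
  else []
termination_by (rows.headD []).length
decreasing_by
  obtain ⟨hne, hall⟩ := h
  cases rows with
  | nil => exact absurd rfl hne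
  | cons r rs =>
      have hr : r ≠ [] := by
        have := List.all_eq_true.mp hall r (List.mem_cons_self)
        simpa using this
      have hr0 : r.length ≠ 0 := fun h0 => hr (List.length_eq_zero_iff.mp h0)
      simp [List.headD]
      omega

-- B's per-row columns: '[list(c) for c in zip(*padded)]' with the 'or'-default of empty columns
def pvRowCols (bl : Nat) (elements : List String) : List (List String) :=
  let cols := (pvZip (elements.map (pvPad bl))).map (fun c => c.map (fun ch => String.ofList [ch]))
  if cols.isEmpty then List.replicate bl [] else cols

def split_tables_alt (ff_table : List (String × List String)) (ff_type : String) : List (String × List (String × List String)) :=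
  let d := (PySem.Dict.ofList ff_table).items
  let binary_length := Nat.log2 d.length
  let rows := d.map (fun r => (r.1, pvRowCols binary_length r.2))
  (List.range binary_length).map (fun (i : Nat) =>
    (ff_type ++ PySem.Int.toStr ((binary_length : Int) - (i : Int) - 1),
     rows.map (fun r => (r.1, (r.2).getD i []))))   -- cols[i], always in range

-- ===== PRECONDITION & SPEC =====
-- Pre_ excludes only the empty table, on which A's int(log2(0)) raises ValueError; B raises there too.
def Pre_split_tables (ff_table : List (String × List String)) (ff_type : String) : Prop := ff_table ≠ []
instance (ff_table : List (String × List String)) (ff_type : String) : Decidable (Pre_split_tables ff_table ff_type) := by unfold Pre_split_tables; infer_instance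

def pvWitness_split_tables : (List (String × List String)) × String := ([("ab", ["10", "0", "111"]), ("cd", ["1", ""])], "T")

def Spec_split_tables (ff_table : List (String × List String)) (ff_type : String) (out : List (String × List (String × List String))) : Prop := out = split_tables_alt ff_table ff_type
instance (ff_table : List (String × List String)) (ff_type : String) (out : List (String × List (String × List String))) : Decidable (Spec_split_tables ff_table ff_type out) := by unfold Spec_split_tables; infer_instance

-- ===== CLAIM (what is proved, stated in full; the proofs are below) =====
def Claim_equal_split_tables : Prop := ∀ (ff_table : List (String × List String)) (ff_type : String), Dom_split_tables ff_table ff_type → Pre_split_tables ff_table ff_type → Spec_split_tables ff_table ff_type (split_tables ff_table ff_type)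

-- ===== LEMMAS AND PROOFS =====

-- pvZip on equal-width rows is the index-wise transposition
lemma pvZip_eq_cols (bl : Nat) (rows : List (List Char)) (hne : rows ≠ [])
    (hlen : ∀ r ∈ rows, r.length = bl) :
    pvZip rows = (List.range bl).map (fun i => rows.map (fun r => r.getD i ' ')) := by
  induction bl generalizing rows with
  | zero =>
      rw [pvZip]
      have : ¬ (rows ≠ [] ∧ rows.all (fun r => !r.isEmpty)) := by
        intro ⟨_, hall⟩
        cases rows with
        | nil => exact hne rfl
        | cons r rs =>
            have h1 := List.all_eq_true.mp hall r (List.mem_cons_self)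
            have h2 := hlen r (List.mem_cons_self)
            simp [List.length_eq_zero_iff.mp h2] at h1
      rw [dif_neg this]; simp
  | succ bl ih =>
      have hallne : ∀ r ∈ rows, r ≠ [] := by
        intro r hr; have := hlen r hr; intro h; simp [h] at this
      rw [pvZip, dif_pos ⟨hne, List.all_eq_true.mpr (fun r hr => by
        simpa [List.isEmpty_iff] using hallne r hr)⟩]
      rw [ih (rows.map List.tail) (by simpa using hne) ?_]
      · rw [List.range_succ_eq_map]
        simp only [List.map_cons, List.map_map]
        congr 1
        · apply List.map_congr_left
          intro r hr
          cases r with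
          | nil => exact absurd rfl (hallne [] hr)
          | cons c cs => simp [List.headD, List.getD]
        · apply List.map_congr_left
          intro i _
          simp only [Function.comp]
          apply List.map_congr_left
          intro r hr
          cases r with
          | nil => exact absurd rfl (hallne [] hr)
          | cons c cs => simp [List.getD]
      · intro r hr
        obtain ⟨s, hs, rfl⟩ := List.mem_map.mp hr
        have := hlen s hs
        simpa using congrArg Nat.pred this

lemma pvPad_length (bl : Nat) (e : String) : (pvPad bl e).length = bl := by
  simp only [pvPad, List.length_append, List.length_take, List.length_replicate]; omega

-- padded character i  =  A's try/except extraction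
lemma pvPad_getD (bl : Nat) (e : String) (i : Nat) (hi : i < bl) :
    String.ofList [(pvPad bl e).getD i ' '] = pvTryCharAt e (i : Int) := by
  have hl := pvPad_length bl e
  rw [List.getD_eq_getElem _ _ (by omega)]
  unfold pvPad pvTryCharAt
  simp only [PySem.Str.pyGet?_natCast]
  by_cases h : i < e.toList.length
  · have ht : i < (e.toList.take bl).length := by rw [List.length_take]; omega
    rw [List.getElem_append_left ht, List.getElem_take, List.getElem?_eq_getElem h]
  · have ht : (e.toList.take bl).length ≤ i := by rw [List.length_take]; omega
    rw [List.getElem_append_right ht, List.getElem_replicate,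
        List.getElem?_eq_none (Nat.le_of_not_lt h)]

-- B's per-row columns, read at a bit position, are A's per-row extraction at that position
lemma pvRowCols_getD (bl : Nat) (es : List String) (i : Nat) (hi : i < bl) :
    (pvRowCols bl es).getD i [] = es.map (fun e => pvTryCharAt e (i : Int)) := by
  unfold pvRowCols
  cases es with
  | nil =>
      simp [pvZip]
  | cons e es' =>
      rw [pvZip_eq_cols bl _ (by simp) (by intro r hr; obtain ⟨s, _, rfl⟩ := List.mem_map.mp hr; exact pvPad_length bl s)]
      have hlen : (((List.range bl).map (fun i => ((e :: es').map (pvPad bl)).map (fun r => r.getD i ' '))).map (fun c => c.map (fun ch => String.ofList [ch]))).length = bl := by simp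
      rw [if_neg (by simp [List.isEmpty_iff]; omega)]
      rw [List.getD_eq_getElem _ _ (by simpa [hlen] using hi)]
      simp only [List.getElem_map, List.getElem_range, List.map_map, Function.comp]
      apply List.map_congr_left
      intro s _
      exact pvPad_getD bl s i hi

-- A's nested append-folds are the nested maps
lemma pvA_eq_map (d : List (String × List String)) (bl : Nat) (ff_type : String) :
    (List.range bl).foldl (fun acc (i : Nat) =>
      let splitted_table := d.foldl (fun st row =>
        let splitted_row := row.2.foldl (fun sr element => sr ++ [pvTryCharAt element (i : Int)]) []
        st ++ [(row.1, splitted_row)]) []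
      acc ++ [(ff_type ++ PySem.Int.toStr ((bl : Int) - (i : Int) - 1), splitted_table)]) []
    = (List.range bl).map (fun (i : Nat) => (ff_type ++ PySem.Int.toStr ((bl : Int) - (i : Int) - 1),
        d.map (fun row => (row.1, row.2.map (fun e => pvTryCharAt e (i : Int)))))) := by
  simp only [PySem.List.foldl_append_singleton_eq_map, List.nil_append]

-- ===== VERDICT (by name: the statement is the Claim_ definition above) =====
theorem split_tables_spec : Claim_equal_split_tables := by
  intro ff_table ff_type _ _
  show split_tables ff_table ff_type = split_tables_alt ff_table ff_type
  unfold split_tables split_tables_alt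
  rw [pvA_eq_map]
  apply List.map_congr_left
  intro i hi
  have hib : i < Nat.log2 (PySem.Dict.ofList ff_table).items.length := List.mem_range.mp hi
  refine Prod.ext rfl ?_
  simp only [List.map_map]
  apply List.map_congr_left
  intro r _
  refine Prod.ext rfl ?_
  show r.2.map (fun e => pvTryCharAt e (i : Int)) = (pvRowCols _ r.2).getD i []
  rw [pvRowCols_getD _ _ _ hib]
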